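-- pv_equiv track=rewrite | github.com/jdoeun/Algorithm-Study | iceprins/241009/PSG_할인_행사.py | solution
-- ===== SOURCE A (Python) =====
-- from collections import defaultdict
--
-- def solution(want, number, discount):
--     answer = 0
--
--     buy = dict()
--
--     for i in range(len(want)):
--         buy[want[i]] = number[i]
--
--     for i in range(len(discount) - 9):
--         info = defaultdict(int)
--         flag = True
--         for j in range(i, i + 10):
--             info[discount[j]] += 1
--
--         for fruit in buy:
--             if buy[fruit] > info[fruit]:
--                 flag = False
--                 break
--         if not flag:
--             continue
--         else:
--             answer += 1
--
--     return answer
-- ===== SOURCE B (Python) =====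
-- def solution(want, number, discount):
--     req = {}
--     for w, n in zip(want, number):
--         req[w] = n
--     if len(discount) < 10:
--         return 0
--     counts = {}
--     for fruit in discount[:10]:
--         counts[fruit] = counts.get(fruit, 0) + 1
--     answer = 0
--     if all(q <= counts.get(f, 0) for f, q in req.items()):
--         answer += 1
--     for r in range(10, len(discount)):
--         out = discount[r - 10]
--         counts[out] = counts.get(out, 0) - 1
--         inc = discount[r]
--         counts[inc] = counts.get(inc, 0) + 1
--         if all(q <= counts.get(f, 0) for f, q in req.items()):
--             answer += 1
--     return answer
-- ===== Notes on version B (the rewrite author's own statement) =====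
-- stated objective: alternative
-- what changed: B replaces A's per-window recount (a fresh defaultdict built over all 10 items of every window) with a single sliding-window pass that maintains the window's counts incrementally, updating only the leaving and entering element; measured ~1.8x at mid sizes but not confirmed at the largest, so no speed is claimed.
import Mathlib
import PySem

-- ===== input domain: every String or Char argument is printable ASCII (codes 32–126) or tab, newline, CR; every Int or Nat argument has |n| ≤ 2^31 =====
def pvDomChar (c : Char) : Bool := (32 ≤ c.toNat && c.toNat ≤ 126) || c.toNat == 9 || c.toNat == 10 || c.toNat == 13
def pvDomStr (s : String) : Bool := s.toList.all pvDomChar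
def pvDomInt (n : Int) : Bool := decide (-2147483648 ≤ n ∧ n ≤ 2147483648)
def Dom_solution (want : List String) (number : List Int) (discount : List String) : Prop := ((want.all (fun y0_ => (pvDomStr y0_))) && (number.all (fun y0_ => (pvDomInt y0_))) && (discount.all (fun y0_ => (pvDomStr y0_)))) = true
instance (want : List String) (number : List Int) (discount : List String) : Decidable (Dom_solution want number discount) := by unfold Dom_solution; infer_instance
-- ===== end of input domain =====

-- B replaces A's per-window recount (a fresh defaultdict over 10 items per window) by ONE
-- sliding pass that maintains the window's counts incrementally; return values agree on Pre_.

-- ===== PORT A =====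
def solution (want : List String) (number : List Int) (discount : List String) : Int :=
  let buy : PySem.Dict String Int :=
    (PySem.List.pyRange 0 (want.length : Int) 1).foldl
      (fun d i => d.insert (PySem.List.pyGetD want i "") (PySem.List.pyGetD number i 0))
      PySem.Dict.empty
  (PySem.List.pyRange 0 ((discount.length : Int) - 9) 1).foldl
    (fun answer i =>
      let info : PySem.Dict String Int :=
        (PySem.List.pyRange i (i + 10) 1).foldl
          (fun d j => d.modify (PySem.List.pyGetD discount j "") 0 (· + 1))
          PySem.Dict.empty
      -- 'for fruit in buy: if buy[fruit] > info[fruit]: flag = False; break' as an all-check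
      let flag := buy.items.all (fun p => decide (p.2 ≤ info.getD p.1 0))
      if flag then answer + 1 else answer)
    0

-- ===== PORT B =====
-- 'all(q <= counts.get(f, 0) for f, q in req.items())'
def winCheck (req counts : PySem.Dict String Int) : Bool :=
  req.items.all (fun p => decide (p.2 ≤ counts.getD p.1 0))

-- one iteration of B's sliding loop (body of 'for r in range(10, len(discount))')
def slideStep (req : PySem.Dict String Int) (discount : List String)
    (st : PySem.Dict String Int × Int) (r : Int) : PySem.Dict String Int × Int :=
  let out := PySem.List.pyGetD discount (r - 10) ""
  let c1 := st.1.insert out (st.1.getD out 0 - 1)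
  let inc := PySem.List.pyGetD discount r ""
  let c2 := c1.insert inc (c1.getD inc 0 + 1)
  (c2, if winCheck req c2 then st.2 + 1 else st.2)

def solution_alt (want : List String) (number : List Int) (discount : List String) : Int :=
  let req : PySem.Dict String Int :=
    (want.zip number).foldl (fun d p => d.insert p.1 p.2) PySem.Dict.empty
  if (discount.length : Int) < 10 then 0
  else
    let counts0 : PySem.Dict String Int :=
      (PySem.List.slice discount (some 0) (some 10)).foldl
        (fun d x => d.insert x (d.getD x 0 + 1)) PySem.Dict.empty
    let a0 : Int := if winCheck req counts0 then 1 else 0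
    ((PySem.List.pyRange 10 (discount.length : Int) 1).foldl
        (slideStep req discount) (counts0, a0)).2

-- ===== PRECONDITION & SPEC =====
-- Pre_ excludes exactly the inputs where A raises IndexError: number shorter than want
-- (number[i] is read for every index i of want).
def Pre_solution (want : List String) (number : List Int) (discount : List String) : Prop :=
  want.length ≤ number.length
instance (want : List String) (number : List Int) (discount : List String) : Decidable (Pre_solution want number discount) := by unfold Pre_solution; infer_instance

def pvWitness_solution : List String × List Int × List String :=
  (["apple"], [2], ["apple", "pear", "apple", "pear", "apple", "pear", "apple", "pear", "apple", "pear", "pear"])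

def Spec_solution (want : List String) (number : List Int) (discount : List String) (out : Int) : Prop := out = solution_alt want number discount
instance (want : List String) (number : List Int) (discount : List String) (out : Int) : Decidable (Spec_solution want number discount out) := by unfold Spec_solution; infer_instance

-- ===== CLAIM (what is proved, stated in full; the proofs are below) =====
def Claim_equal_solution : Prop := ∀ (want : List String) (number : List Int) (discount : List String), Dom_solution want number discount → Pre_solution want number discount → Spec_solution want number discount (solution want number discount)


-- ===== LEMMAS AND PROOFS =====

-- the window starting at Nat position n
def win (discount : List String) (n : Nat) : List String := (discount.drop n).take 10

-- does window `w` satisfy every requirement of `req`?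
def okWin (req : PySem.Dict String Int) (w : List String) : Bool :=
  req.items.all (fun p => decide (p.2 ≤ (w.count p.1 : Int)))

-- the common specification both ports are reduced to
def specCount (req : PySem.Dict String Int) (discount : List String) : Int :=
  (PySem.List.pyRange 0 ((discount.length : Int) - 9) 1).foldl
    (fun a i => if okWin req (win discount i.toNat) then a + 1 else a) 0

lemma all_congr_mem {α : Type} {l : List α} {p q : α → Bool}
    (h : ∀ x ∈ l, p x = q x) : l.all p = l.all q := by
  induction l with
  | nil => rfl
  | cons a t ih => simp_all [List.all_cons]

lemma winCheck_eq_okWin (req c : PySem.Dict String Int) (w : List String)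
    (h : ∀ f, c.getD f 0 = (w.count f : Int)) : winCheck req c = okWin req w := by
  unfold winCheck okWin
  exact all_congr_mem (fun p _ => by rw [h])

lemma build_eq (xs : List String) (ys : List Int) (h : xs.length ≤ ys.length) :
    (PySem.List.pyRange 0 (xs.length : Int) 1).foldl
      (fun d i => d.insert (PySem.List.pyGetD xs i "") (PySem.List.pyGetD ys i 0))
      PySem.Dict.empty
    = (xs.zip ys).foldl (fun d p => d.insert p.1 p.2) PySem.Dict.empty := by
  have hz : (xs.zip ys).length = xs.length := by simp; omega
  have hb : (xs.length : Int) = ((xs.zip ys).length : Int) := by rw [hz]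
  rw [hb]
  rw [PySem.List.foldl_congr_mem (g := fun d i =>
      (fun (d : PySem.Dict String Int) (p : String × Int) => d.insert p.1 p.2) d
        (PySem.List.pyGetD (xs.zip ys) i ("", 0)))]
  · exact PySem.List.foldl_pyRange_zero_pyGetD' (xs.zip ys) ("", 0)
      (fun d p => d.insert p.1 p.2) PySem.Dict.empty
  · intro acc i hi
    rw [PySem.List.mem_pyRange_one] at hi
    have h1 : 0 ≤ i := hi.1
    have h2 : i < xs.length := by rw [hz] at hi; exact_mod_cast hi.2
    simp only
    rw [PySem.List.pyGetD_eq_getElem xs "" h1 (by exact_mod_cast h2),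
        PySem.List.pyGetD_eq_getElem ys 0 h1 (by exact_mod_cast (by omega : i < (ys.length : Int))),
        PySem.List.pyGetD_eq_getElem (xs.zip ys) ("", 0) h1 (by rw [hz]; exact_mod_cast h2),
        List.getElem_zip]

lemma map_window (xs : List String) (a : Int) (h0 : 0 ≤ a) (h : a + 10 ≤ (xs.length : Int)) :
    (PySem.List.pyRange a (a + 10) 1).map (fun j => PySem.List.pyGetD xs j "")
      = win xs a.toNat := by
  rw [PySem.List.pyRange_one, List.map_map]
  have h10 : (a + 10 - a).toNat = 10 := by omega
  rw [h10]
  apply List.ext_getElem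
  · simp [win]; omega
  · intro k hk1 hk2
    simp only [List.getElem_map, List.getElem_range, Function.comp_apply]
    rw [PySem.List.pyGetD_eq_getElem xs "" (by simp at hk1; omega) (by simp at hk1 ⊢; omega)]
    simp [win]
    congr 1
    simp at hk1
    omega

lemma window_count (xs : List String) (n : Nat) (h : n + 11 ≤ xs.length) (f : String) :
    ((win xs (n + 1)).count f : Int)
      = ((win xs n).count f : Int)
        + (if xs[n + 10]'(by omega) = f then 1 else 0)
        - (if xs[n]'(by omega) = f then 1 else 0) := by
  have e1 : (xs.drop n).take 11 = xs[n]'(by omega) :: win xs (n + 1) := by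
    rw [List.drop_eq_getElem_cons (by omega)]
    rfl
  have e2 : (xs.drop n).take 11 = (win xs n) ++ [xs[n + 10]'(by omega)] := by
    have := List.take_add_one (l := xs.drop n) (i := 10)
    rw [this]
    rw [List.getElem?_drop]
    simp [win, List.getElem?_eq_getElem (by omega : n + 10 < xs.length)]
  have := congrArg (fun l => l.count f) e1
  rw [e2] at this
  simp [List.count_cons, List.count_append] at this
  by_cases h1 : xs[n]'(by omega) = f <;> by_cases h2 : xs[n + 10]'(by omega) = f <;>
    simp [h1, h2] at this ⊢ <;> omega

lemma slide_inv (req : PySem.Dict String Int) (discount : List String) (n : Nat)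
    (hn : 10 + n ≤ discount.length) :
    (∀ f, ((PySem.List.pyRange 10 (10 + (n : Int)) 1).foldl (slideStep req discount)
        (PySem.Dict.counter (discount.take 10),
         if winCheck req (PySem.Dict.counter (discount.take 10)) then 1 else 0)).1.getD f 0
      = ((win discount n).count f : Int)) ∧
    ((PySem.List.pyRange 10 (10 + (n : Int)) 1).foldl (slideStep req discount)
        (PySem.Dict.counter (discount.take 10),
         if winCheck req (PySem.Dict.counter (discount.take 10)) then 1 else 0)).2
      = (PySem.List.pyRange 0 ((n : Int) + 1) 1).foldl
          (fun a i => if okWin req (win discount i.toNat) then a + 1 else a) 0 := by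
  induction n with
  | zero =>
    rw [show ((10 : Int) + (0 : Nat)) = 10 by norm_num, PySem.List.pyRange_one_eq_nil le_rfl]
    constructor
    · intro f
      simp [PySem.Dict.getD_counter, win]
    · rw [show ((0 : Nat) : Int) + 1 = 0 + 1 by norm_num, PySem.List.pyRange_one_singleton]
      simp only [List.foldl]
      rw [winCheck_eq_okWin req _ (win discount (0 : Int).toNat)
          (fun f => by simp [PySem.Dict.getD_counter, win])]
      split <;> norm_num
  | succ m ih =>
    have hm := ih (by omega)
    have hsplit : PySem.List.pyRange 10 (10 + ((m + 1 : Nat) : Int)) 1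
        = PySem.List.pyRange 10 (10 + (m : Int)) 1 ++ [10 + (m : Int)] := by
      have := PySem.List.pyRange_one_succ_right (a := 10) (b := 10 + (m : Int)) (by omega)
      push_cast
      rw [← this]
      ring_nf
    rw [hsplit, List.foldl_append]
    set st := (PySem.List.pyRange 10 (10 + (m : Int)) 1).foldl (slideStep req discount)
        (PySem.Dict.counter (discount.take 10),
         if winCheck req (PySem.Dict.counter (discount.take 10)) then 1 else 0) with hst
    simp only [List.foldl_cons, List.foldl_nil]
    have hout : PySem.List.pyGetD discount (10 + (m : Int) - 10) "" = discount[m]'(by omega) := by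
      rw [show (10 + (m : Int) - 10) = (m : Int) by ring]
      rw [PySem.List.pyGetD_eq_getElem discount "" (by omega)
          (by exact_mod_cast (by omega : (m : Int) < discount.length))]
      simp
    have hinc : PySem.List.pyGetD discount (10 + (m : Int)) "" = discount[m + 10]'(by omega) := by
      rw [PySem.List.pyGetD_eq_getElem discount "" (by omega) (by omega)]
      congr 1
      omega
    obtain ⟨hmc, hma⟩ := hm
    clear_value st
    have hcount : ∀ f, ((slideStep req discount st (10 + (m : Int))).1.getD f 0)
        = ((win discount (m + 1)).count f : Int) := by
      intro f
      unfold slideStep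
      simp only [hout, hinc, PySem.Dict.getD_insert, hmc]
      rw [window_count discount m (by omega) f]
      clear hma hsplit hst ih hmc hout hinc
      split_ifs <;> subst_eqs <;> simp_all
    refine ⟨hcount, ?_⟩
    have hrange2 : PySem.List.pyRange 0 (((m + 1 : Nat) : Int) + 1) 1
        = PySem.List.pyRange 0 ((m : Int) + 1) 1 ++ [(m : Int) + 1] := by
      have := PySem.List.pyRange_one_succ_right (a := 0) (b := (m : Int) + 1) (by omega)
      push_cast
      rw [← this]
    rw [hrange2, List.foldl_append]
    simp only [List.foldl_cons, List.foldl_nil]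
    have h2 : (slideStep req discount st (10 + (m : Int))).2
        = if winCheck req (slideStep req discount st (10 + (m : Int))).1 then st.2 + 1
          else st.2 := rfl
    rw [h2, winCheck_eq_okWin req _ (win discount (m + 1)) hcount, hma]
    have htn : (((m : Int) + 1)).toNat = m + 1 := by omega
    rw [htn]

-- the A-side inner fold produces the counter of the window
lemma info_eq_counter (discount : List String) (i : Int) (h0 : 0 ≤ i)
    (h : i + 10 ≤ (discount.length : Int)) :
    (PySem.List.pyRange i (i + 10) 1).foldl
        (fun d j => d.modify (PySem.List.pyGetD discount j "") 0 (· + 1))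
        PySem.Dict.empty
      = PySem.Dict.counter (win discount i.toNat) := by
  rw [PySem.Dict.counter_eq_foldl, ← map_window discount i h0 h, List.foldl_map]

lemma A_flag (buy : PySem.Dict String Int) (discount : List String) (i : Int) (h0 : 0 ≤ i)
    (h : i + 10 ≤ (discount.length : Int)) :
    (buy.items.all (fun p => decide (p.2 ≤
        ((PySem.List.pyRange i (i + 10) 1).foldl
          (fun d j => d.modify (PySem.List.pyGetD discount j "") 0 (· + 1))
          PySem.Dict.empty).getD p.1 0)))
      = okWin buy (win discount i.toNat) := by
  rw [info_eq_counter discount i h0 h]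
  exact all_congr_mem (fun p _ => by rw [PySem.Dict.getD_counter])

lemma A_eq_spec (want : List String) (number : List Int) (discount : List String)
    (h : want.length ≤ number.length) :
    solution want number discount
      = specCount ((want.zip number).foldl (fun d p => d.insert p.1 p.2) PySem.Dict.empty)
          discount := by
  unfold solution specCount
  rw [build_eq want number h]
  apply PySem.List.foldl_congr_mem
  intro acc i hi
  rw [PySem.List.mem_pyRange_one] at hi
  simp only
  rw [A_flag _ discount i hi.1 (by omega)]

lemma B_eq_spec (want : List String) (number : List Int) (discount : List String) :
    solution_alt want number discount
      = specCount ((want.zip number).foldl (fun d p => d.insert p.1 p.2) PySem.Dict.empty)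
          discount := by
  unfold solution_alt specCount
  set req := (want.zip number).foldl
      (fun (d : PySem.Dict String Int) (p : String × Int) => d.insert p.1 p.2)
      PySem.Dict.empty with hreq
  by_cases hL : (discount.length : Int) < 10
  · rw [if_pos hL, PySem.List.pyRange_one_eq_nil (by omega)]
    rfl
  · rw [if_neg hL]
    have h10 : 10 ≤ discount.length := by exact_mod_cast not_lt.mp hL
    have hslice : PySem.List.slice discount (some 0) (some 10) = discount.take 10 := by
      simp [pysem]
    rw [hslice, PySem.Dict.foldl_insert_getD_add_one_eq_counter]
    have hn := (slide_inv req discount (discount.length - 10) (by omega)).2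
    have e1 : 10 + ((discount.length - 10 : Nat) : Int) = (discount.length : Int) := by
      push_cast [h10]
      ring
    have e2 : ((discount.length - 10 : Nat) : Int) + 1 = (discount.length : Int) - 9 := by
      push_cast [h10]
      ring
    rw [e1, e2] at hn
    exact hn

-- ===== VERDICT (by name: the statement is the Claim_ definition above) =====
theorem solution_spec : Claim_equal_solution := by
  intro want number discount _ hpre
  unfold Spec_solution
  rw [A_eq_spec want number discount hpre, B_eq_spec]
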